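-- pv_equiv track=rewrite | github.com/mohrobati/wasm_walker | path.py | get_function_paths
-- ===== SOURCE A (Python) =====
-- import json, copy, hashlib
--
-- def get_function_paths(paths, function_indices, offset):
--     count = offset - 1
--     active = False
--     final_paths = []
--     curr_func_paths = []
--     for path in paths:
--         if not path.startswith("Func"):
--             break
--         if path == "Func,Span":
--             if active:
--                 active = False
--                 final_paths.append(copy.deepcopy(curr_func_paths))
--                 curr_func_paths = []
--             count += 1
--             if count in function_indices:
--                 active = True
--         if active:
--             curr_func_paths.append(path)
--     if len(curr_func_paths) > 0: final_paths.append(copy.deepcopy(curr_func_paths))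
--     return final_paths
-- ===== SOURCE B (Python) =====
-- import copy
--
-- def _leading_func_run(paths):
--     """The longest prefix of paths whose entries all start with "Func"."""
--     run = []
--     for p in paths:
--         if not p.startswith("Func"):
--             break
--         run.append(p)
--     return run
--
-- def _split_at_markers(run):
--     """Split run into chunks, each beginning at a "Func,Span" marker;
--     entries before the first marker are dropped."""
--     chunks = []
--     current = None
--     for p in run:
--         if p == "Func,Span":
--             if current is not None:
--                 chunks.append(current)
--             current = [p]
--         elif current is not None:
--             current.append(p)
--     if current is not None:
--         chunks.append(current)
--     return chunks
--
-- def get_function_paths(paths, function_indices, offset):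
--     chunks = _split_at_markers(_leading_func_run(paths))
--     return [copy.deepcopy(c) for i, c in enumerate(chunks)
--             if offset + i in function_indices]
-- ===== Notes on version B (the rewrite author's own statement) =====
-- stated objective: alternative
-- what changed: A's single interleaved loop with a running count and an active flag is replaced by three independent passes: take the leading 'Func'-prefixed run, split it into chunks at 'Func,Span' markers (dropping entries before the first marker), then keep the chunks whose position offset+i is in function_indices.
import Mathlib
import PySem

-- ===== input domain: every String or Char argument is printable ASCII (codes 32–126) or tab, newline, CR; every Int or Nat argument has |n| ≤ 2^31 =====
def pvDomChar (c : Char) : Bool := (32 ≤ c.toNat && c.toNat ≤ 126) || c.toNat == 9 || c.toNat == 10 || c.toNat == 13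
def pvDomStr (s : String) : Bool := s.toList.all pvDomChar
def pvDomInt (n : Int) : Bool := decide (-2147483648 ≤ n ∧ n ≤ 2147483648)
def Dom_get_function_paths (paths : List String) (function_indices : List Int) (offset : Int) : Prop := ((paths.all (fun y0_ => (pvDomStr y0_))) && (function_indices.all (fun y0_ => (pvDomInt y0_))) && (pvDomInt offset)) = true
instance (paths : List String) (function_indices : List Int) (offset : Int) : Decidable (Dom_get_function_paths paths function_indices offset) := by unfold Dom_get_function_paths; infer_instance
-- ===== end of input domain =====

-- B re-decomposes A's single interleaved loop into three passes (leading "Func" run,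
-- split at "Func,Span" markers, filter chunks by position); same values, objective: alternative.
-- deepcopy is the identity on lists of immutable strings, so it is not ported.

-- ===== PORT A =====
-- the for-loop of A: state (count, active, final_paths, curr_func_paths); break = return state
def pvLoopA (fi : List Int) : List String → Int → Bool → List (List String) → List String → List (List String) × List String
  | [], _, _, f, cur => (f, cur)
  | p :: rest, c, a, f, cur =>
    if PySem.Str.startswith p "Func" then
      if p = "Func,Span" then
        -- if active: active=False; flush deepcopy; curr=[]
        let a1 : Bool := if a then false else a
        let f1 := if a then f ++ [cur] else f
        let cur1 : List String := if a then [] else cur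
        let c1 := c + 1
        -- if count in function_indices: active = True
        let a2 : Bool := if fi.contains c1 then true else a1
        -- if active: curr.append(path)
        let cur2 := if a2 then cur1 ++ [p] else cur1
        pvLoopA fi rest c1 a2 f1 cur2
      else
        let cur1 := if a then cur ++ [p] else cur
        pvLoopA fi rest c a f cur1
    else (f, cur)  -- break

def get_function_paths (paths : List String) (function_indices : List Int) (offset : Int) : List (List String) :=
  let st := pvLoopA function_indices paths (offset - 1) false [] []
  if st.2.length > 0 then st.1 ++ [st.2] else st.1

-- ===== PORT B =====
-- _leading_func_run
def pvFuncRun : List String → List String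
  | [] => []
  | p :: rest => if PySem.Str.startswith p "Func" then p :: pvFuncRun rest else []

-- the loop of _split_at_markers: state (chunks, current : Option)
def pvSplitLoop : List String → List (List String) → Option (List String) → List (List String) × Option (List String)
  | [], chunks, cur => (chunks, cur)
  | p :: rest, chunks, cur =>
    if p = "Func,Span" then
      pvSplitLoop rest (chunks ++ (match cur with | some cc => [cc] | none => [])) (some [p])
    else
      pvSplitLoop rest chunks (match cur with | some cc => some (cc ++ [p]) | none => none)

def pvSplitAtMarkers (run : List String) : List (List String) :=
  let st := pvSplitLoop run [] none
  st.1 ++ (match st.2 with | some cc => [cc] | none => [])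

-- the comprehension [c for i, c in enumerate(chunks) if offset + i in function_indices]
def pvSelect (fi : List Int) (i : Int) : List (List String) → List (List String)
  | [] => []
  | c :: cs => if fi.contains i then c :: pvSelect fi (i + 1) cs else pvSelect fi (i + 1) cs

def get_function_paths_alt (paths : List String) (function_indices : List Int) (offset : Int) : List (List String) :=
  pvSelect function_indices offset (pvSplitAtMarkers (pvFuncRun paths))

-- ===== PRECONDITION & SPEC =====
def Spec_get_function_paths (paths : List String) (function_indices : List Int) (offset : Int) (out : List (List String)) : Prop := out = get_function_paths_alt paths function_indices offset
instance (paths : List String) (function_indices : List Int) (offset : Int) (out : List (List String)) : Decidable (Spec_get_function_paths paths function_indices offset out) := by unfold Spec_get_function_paths; infer_instance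

-- ===== CLAIM (what is proved, stated in full; the proofs are below) =====
def Claim_equal_get_function_paths : Prop := ∀ (paths : List String) (function_indices : List Int) (offset : Int), Dom_get_function_paths paths function_indices offset → Spec_get_function_paths paths function_indices offset (get_function_paths paths function_indices offset)

-- ===== LEMMAS AND PROOFS =====

theorem pvSpanFunc : PySem.Chars.startswith ['F', 'u', 'n', 'c', ',', 'S', 'p', 'a', 'n'] ['F', 'u', 'n', 'c'] = true := by decide

theorem mem_pvFuncRun_startswith {paths : List String} {p : String}
    (h : p ∈ pvFuncRun paths) : PySem.Chars.startswith p.toList ['F', 'u', 'n', 'c'] = true := by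
  induction paths with
  | nil => simp [pvFuncRun] at h
  | cons q rest ih =>
    by_cases hq : PySem.Chars.startswith q.toList ['F', 'u', 'n', 'c'] = true
    · simp [pvFuncRun, hq] at h
      rcases h with h | h
      · exact h ▸ hq
      · exact ih h
    · simp [pvFuncRun, hq] at h

-- A's loop breaks exactly where the leading "Func" run ends
theorem pvLoopA_funcRun (fi : List Int) (paths : List String) :
    ∀ c a f cur, pvLoopA fi paths c a f cur = pvLoopA fi (pvFuncRun paths) c a f cur := by
  induction paths with
  | nil => intro c a f cur; rfl
  | cons p rest ih =>
    intro c a f cur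
    by_cases hp : PySem.Chars.startswith p.toList ['F', 'u', 'n', 'c'] = true
    · by_cases hs : p = "Func,Span" <;> simp [pvLoopA, pvFuncRun, hp, hs, pvSpanFunc, ih]
    · simp [pvLoopA, pvFuncRun, hp]

-- the chunk accumulator only ever grows on the right
theorem pvSplitLoop_acc (L : List String) :
    ∀ chunks cur, pvSplitLoop L chunks cur
      = (chunks ++ (pvSplitLoop L [] cur).1, (pvSplitLoop L [] cur).2) := by
  induction L with
  | nil => intro chunks cur; simp [pvSplitLoop]
  | cons p rest ih =>
    intro chunks cur
    by_cases hs : p = "Func,Span"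
    · simp only [pvSplitLoop, if_pos hs, List.nil_append]
      rw [ih, ih (match cur with | some cc => [cc] | none => [])]
      simp [List.append_assoc]
    · simp only [pvSplitLoop, if_neg hs]
      exact ih ..

theorem pvSelect_append (fi : List Int) (xs ys : List (List String)) :
    ∀ i, pvSelect fi i (xs ++ ys) = pvSelect fi i xs ++ pvSelect fi (i + xs.length) ys := by
  induction xs with
  | nil => intro i; simp [pvSelect]
  | cons x xs ih =>
    intro i
    have harith : i + 1 + (xs.length : Int) = i + ((xs.length : Int) + 1) := by ring
    by_cases h : (i ∈ fi)
    · simp [pvSelect, h, ih (i + 1), harith]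
    · simp [pvSelect, h, ih (i + 1), harith]

-- the current chunk of B's splitter is never empty (it starts at a marker)
def pvOptNE : Option (List String) → Prop
  | none => True
  | some cc => cc ≠ []

theorem pvSplitLoop_snd_ne (L : List String) :
    ∀ chunks cur, pvOptNE cur → pvOptNE (pvSplitLoop L chunks cur).2 := by
  induction L with
  | nil => intro chunks cur h; exact h
  | cons p rest ih =>
    intro chunks cur h
    by_cases hs : p = "Func,Span"
    · simp only [pvSplitLoop, if_pos hs]
      exact ih _ _ (by simp [pvOptNE])
    · simp only [pvSplitLoop, if_neg hs]
      refine ih _ _ ?_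
      cases cur with
      | none => trivial
      | some cc => simp [pvOptNE]

-- A's active flag / current chunk, derived from B's splitter state
def pvAOf (fi : List Int) (c : Int) : Option (List String) → Bool
  | none => false
  | some _ => fi.contains c

def pvCurOf (fi : List Int) (c : Int) : Option (List String) → List String
  | none => []
  | some cc => if fi.contains c then cc else []

def pvDOf : Option (List String) → Int
  | none => 1
  | some _ => 0

-- main invariant: A's loop state corresponds to B's splitter state
theorem pvMain (fi : List Int) (L : List String) :
    ∀ c f cur, (∀ p ∈ L, PySem.Chars.startswith p.toList ['F', 'u', 'n', 'c'] = true) →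
    pvLoopA fi L c (pvAOf fi c cur) f (pvCurOf fi c cur)
      = (f ++ pvSelect fi (c + pvDOf cur) (pvSplitLoop L [] cur).1,
         match (pvSplitLoop L [] cur).2 with
         | none => []
         | some cc => if fi.contains (c + pvDOf cur + (pvSplitLoop L [] cur).1.length) then cc else []) := by
  induction L with
  | nil =>
    intro c f cur _
    cases cur with
    | none => simp [pvLoopA, pvSplitLoop, pvSelect, pvAOf, pvCurOf, pvDOf]
    | some cc => simp [pvLoopA, pvSplitLoop, pvSelect, pvAOf, pvCurOf, pvDOf]
  | cons p rest ih =>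
    intro c f cur hall
    have hp : PySem.Chars.startswith p.toList ['F', 'u', 'n', 'c'] = true := hall p (List.mem_cons_self ..)
    have hrest : ∀ q ∈ rest, PySem.Chars.startswith q.toList ['F', 'u', 'n', 'c'] = true :=
      fun q hq => hall q (List.mem_cons_of_mem _ hq)
    by_cases hs : p = "Func,Span"
    · -- Span step: count increments, the current chunk (if any) is flushed, a new chunk starts
      subst hs
      cases cur with
      | none =>
        have step : pvLoopA fi ("Func,Span" :: rest) c (pvAOf fi c none) f (pvCurOf fi c none)
            = pvLoopA fi rest (c + 1) (pvAOf fi (c+1) (some ["Func,Span"])) f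
                (pvCurOf fi (c+1) (some ["Func,Span"])) := by
          by_cases hc : (c + 1) ∈ fi <;> simp [pvLoopA, hc, pvSpanFunc, pvAOf, pvCurOf]
        have hsplit : pvSplitLoop ("Func,Span" :: rest) [] (none : Option (List String))
            = pvSplitLoop rest [] (some ["Func,Span"]) := by
          simp [pvSplitLoop]
        rw [step, ih (c+1) f (some ["Func,Span"]) hrest, hsplit]
        cases h2 : (pvSplitLoop rest [] (some ["Func,Span"])).2 with
        | none => simp [pvDOf]
        | some dd => simp [pvDOf]
      | some cc =>
        have step : pvLoopA fi ("Func,Span" :: rest) c (pvAOf fi c (some cc)) f (pvCurOf fi c (some cc))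
            = pvLoopA fi rest (c + 1) (pvAOf fi (c+1) (some ["Func,Span"]))
                (f ++ (if c ∈ fi then [cc] else [])) (pvCurOf fi (c+1) (some ["Func,Span"])) := by
          by_cases hcc : c ∈ fi <;> by_cases hc : (c + 1) ∈ fi <;>
            simp [pvLoopA, hcc, hc, pvSpanFunc, pvAOf, pvCurOf]
        have hsplit : pvSplitLoop ("Func,Span" :: rest) [] (some cc)
            = ([cc] ++ (pvSplitLoop rest [] (some ["Func,Span"])).1,
               (pvSplitLoop rest [] (some ["Func,Span"])).2) := by
          have h1 : pvSplitLoop ("Func,Span" :: rest) [] (some cc)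
              = pvSplitLoop rest [cc] (some ["Func,Span"]) := by
            simp [pvSplitLoop]
          rw [h1, pvSplitLoop_acc rest]
        rw [step, ih (c+1) _ (some ["Func,Span"]) hrest, hsplit]
        cases h2 : (pvSplitLoop rest [] (some ["Func,Span"])).2 with
        | none =>
          by_cases hcc : c ∈ fi <;>
            simp [pvDOf, pvSelect_append, pvSelect, hcc, add_assoc, add_comm, add_left_comm]
        | some dd =>
          by_cases hcc : c ∈ fi <;>
            simp [pvDOf, pvSelect_append, pvSelect, hcc, add_assoc, add_comm, add_left_comm]
    · -- non-Span step: the entry joins the current chunk (if any)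
      have step : pvLoopA fi (p :: rest) c (pvAOf fi c cur) f (pvCurOf fi c cur)
          = pvLoopA fi rest c (pvAOf fi c (cur.map (· ++ [p]))) f (pvCurOf fi c (cur.map (· ++ [p]))) := by
        cases cur with
        | none => simp [pvLoopA, hp, hs, pvAOf, pvCurOf]
        | some cc =>
          by_cases hcc : c ∈ fi <;> simp [pvLoopA, hp, hs, hcc, pvAOf, pvCurOf]
      rw [step, ih c f (cur.map (· ++ [p])) hrest]
      have hsplit : pvSplitLoop (p :: rest) [] cur
          = pvSplitLoop rest [] (cur.map (· ++ [p])) := by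
        simp only [pvSplitLoop, if_neg hs]
        cases cur <;> rfl
      rw [hsplit]
      cases cur with
      | none => rfl
      | some cc => rfl

-- ===== VERDICT (by name: the statement is the Claim_ definition above) =====
theorem get_function_paths_spec : Claim_equal_get_function_paths := by
  intro paths fi offset _
  unfold Spec_get_function_paths get_function_paths get_function_paths_alt pvSplitAtMarkers
  rw [pvLoopA_funcRun]
  have main := pvMain fi (pvFuncRun paths) (offset - 1) [] none
      (fun p hp => mem_pvFuncRun_startswith hp)
  simp only [pvAOf, pvCurOf] at main
  rw [main]
  have hne := pvSplitLoop_snd_ne (pvFuncRun paths) [] none trivial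
  cases h2 : (pvSplitLoop (pvFuncRun paths) [] none).2 with
  | none => simp [h2, pvDOf]
  | some cc =>
    rw [h2] at hne
    have hlen : 0 < cc.length := List.length_pos_iff.mpr hne
    by_cases hc : (offset + ((pvSplitLoop (pvFuncRun paths) [] none).1.length : Int)) ∈ fi
    · simp [h2, pvDOf, pvSelect_append, pvSelect, hc, hlen, sub_add_cancel,
            add_assoc, add_comm, add_left_comm]
    · simp [h2, pvDOf, pvSelect_append, pvSelect, hc, sub_add_cancel,
            add_assoc, add_comm, add_left_comm]
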